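-- pv_equiv track=rewrite | github.com/vaibhav-jain-dev/learning-algo | problems/200-must-solve/dynamic-programming/09-numbers-in-pi/python_code.py | numbers_in_pi
-- ===== SOURCE A (Python) =====
-- from typing import List, Optional
--
-- def numbers_in_pi(pi: str, numbers: List[str]) -> int:
--     """
--     Find minimum spaces to split pi into valid numbers using bottom-up DP.
--
--     Args:
--         pi: String of digits
--         numbers: List of valid number strings
--
--     Returns:
--         Minimum number of spaces needed, or -1 if impossible
--     """
--     if not pi:
--         return 0 if not numbers else -1
--
--     # Create a set for O(1) lookup
--     number_set = set(numbers)
--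
--     n = len(pi)
--
--     # dp[i] = minimum numbers needed to split pi[i:]
--     # We use float('inf') to indicate impossible
--     dp = [float('inf')] * (n + 1)
--     dp[n] = 0  # Base case: empty string needs 0 numbers
--
--     # Fill DP table from right to left
--     for i in range(n - 1, -1, -1):
--         # Try all possible prefixes starting at i
--         for j in range(i, n):
--             prefix = pi[i:j + 1]
--
--             if prefix in number_set:
--                 # If this prefix is valid and rest can be split
--                 if dp[j + 1] != float('inf'):
--                     dp[i] = min(dp[i], dp[j + 1] + 1)
--
--     # dp[0] is the number of segments; spaces = segments - 1
--     if dp[0] == float('inf'):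
--         return -1
--
--     return dp[0] - 1
-- ===== SOURCE B (Python) =====
-- from typing import List
--
--
-- def numbers_in_pi(pi: str, numbers: List[str]) -> int:
--     """Word-driven DP: from each position try only the given numbers via
--     startswith, instead of hashing every one of the O(n^2) substrings."""
--     words = set(numbers)
--     n = len(pi)
--     # dp[i] = minimum count of numbers covering pi[i:], None if impossible
--     dp = [None] * (n + 1)
--     dp[n] = 0
--     for i in range(n - 1, -1, -1):
--         cands = [dp[i + len(w)] + 1
--                  for w in words
--                  if pi.startswith(w, i) and dp[i + len(w)] is not None]
--         dp[i] = min(cands, default=None)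
--     return -1 if dp[0] is None else dp[0] - 1
-- ===== Notes on version B (the rewrite author's own statement) =====
-- stated objective: faster
-- what changed: A enumerates all O(n^2) substrings of pi and hashes each into a set; B is a word-driven DP that at each position tries only the given numbers via startswith, so the inner scan over end positions disappears.
-- outside the precondition, e.g. on numbers_in_pi('', []): A returns 0, B returns -1
import Mathlib
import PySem

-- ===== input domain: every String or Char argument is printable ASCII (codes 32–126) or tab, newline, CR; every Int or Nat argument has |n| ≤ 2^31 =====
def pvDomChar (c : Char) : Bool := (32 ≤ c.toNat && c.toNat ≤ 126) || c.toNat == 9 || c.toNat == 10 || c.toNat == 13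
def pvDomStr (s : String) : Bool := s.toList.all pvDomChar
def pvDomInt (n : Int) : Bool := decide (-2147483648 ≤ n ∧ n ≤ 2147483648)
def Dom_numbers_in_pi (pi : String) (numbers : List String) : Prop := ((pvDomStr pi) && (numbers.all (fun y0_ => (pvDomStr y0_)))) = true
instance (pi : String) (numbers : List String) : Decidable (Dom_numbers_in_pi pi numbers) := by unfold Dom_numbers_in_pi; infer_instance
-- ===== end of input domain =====

-- B changes the inner DP step: instead of hashing every one of the O(n^2) substrings of pi
-- into a set, it tries only the given numbers at each position via startswith (word-driven DP).

-- ===== PORT A =====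
-- A stores float('inf') in dp for "impossible"; a dp cell is modelled as Option Int (none = inf).
-- pvOminStep acc x is exactly A's `dp[i] = min(dp[i], x)` with dp[i] possibly inf.
def pvOminStep (acc : Option Int) (x : Int) : Option Int :=
  match acc with
  | none => some x
  | some a => some (min a x)

def numbers_in_pi (pi : String) (numbers : List String) : Int :=
  let p := pi.toList
  if p = [] then (if numbers = [] then 0 else -1)
  else
    let S : PySem.Set String := PySem.Set.ofList numbers
    let n := p.length
    -- dp = [inf] * (n+1); dp[n] = 0
    let dp0 : List (Option Int) := (List.replicate (n + 1) (none : Option Int)).set n (some 0)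
    -- for i in range(n-1, -1, -1): for j in range(i, n):
    --   prefix = pi[i:j+1]  (exact for 0 ≤ i ≤ j < n)
    --   if prefix in number_set and dp[j+1] != inf: dp[i] = min(dp[i], dp[j+1] + 1)
    let dp := (List.range n).reverse.foldl (fun dp i =>
        (List.range' i (n - i)).foldl (fun dp j =>
          if PySem.Set.contains S (String.ofList ((p.drop i).take (j + 1 - i))) = true then
            match dp.getD (j + 1) none with
            | none => dp
            | some v => dp.set i (pvOminStep (dp.getD i none) (v + 1))
          else dp) dp) dp0
    match dp.getD 0 none with
    | none => -1
    | some v => v - 1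

-- ===== PORT B =====
-- str.startswith(w, i) for 0 ≤ i: exact — True iff pi[i:i+len(w)] has length len(w) and equals w.
def pvStartswithAt (p w : List Char) (i : Nat) : Bool :=
  (p.drop i).take w.length == w

-- the list comprehension `cands = [dp[i+len(w)] + 1 for w in words if ...]` of Source B
def pvCands (words : PySem.Set String) (p : List Char) (dp : List (Option Int)) (i : Nat) : List Int :=
  words.filterMap (fun w =>
    if pvStartswithAt p w.toList i = true then
      match dp.getD (i + w.toList.length) none with
      | some v => some (v + 1)
      | none => none
    else none)

def numbers_in_pi_alt (pi : String) (numbers : List String) : Int :=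
  let p := pi.toList
  let words : PySem.Set String := PySem.Set.ofList numbers
  let n := p.length
  -- dp = [None] * (n+1); dp[n] = 0
  let dp0 : List (Option Int) := (List.replicate (n + 1) (none : Option Int)).set n (some 0)
  -- for i in range(n-1, -1, -1): dp[i] = min(cands, default=None)
  let dp := (List.range n).reverse.foldl (fun dp i =>
      dp.set i (pvCands words p dp i).min?) dp0
  match dp.getD 0 none with
  | none => -1
  | some v => v - 1

-- ===== PRECONDITION & SPEC =====
-- Pre_ excludes only the degenerate input (pi = "", numbers = []): there A's special guard
-- returns 0 while B's uniform DP yields -1, and both values are defensible for splitting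
-- the empty string into zero numbers.
def Pre_numbers_in_pi (pi : String) (numbers : List String) : Prop :=
  ¬ (pi = "" ∧ numbers = [])
instance (pi : String) (numbers : List String) : Decidable (Pre_numbers_in_pi pi numbers) := by
  unfold Pre_numbers_in_pi; infer_instance

def pvWitness_numbers_in_pi : String × List String := ("312", ["3", "12"])

def Spec_numbers_in_pi (pi : String) (numbers : List String) (out : Int) : Prop := out = numbers_in_pi_alt pi numbers
instance (pi : String) (numbers : List String) (out : Int) : Decidable (Spec_numbers_in_pi pi numbers out) := by unfold Spec_numbers_in_pi; infer_instance

-- ===== CLAIM (what is proved, stated in full; the proofs are below) =====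
def Claim_equal_numbers_in_pi : Prop := ∀ (pi : String) (numbers : List String), Dom_numbers_in_pi pi numbers → Pre_numbers_in_pi pi numbers → Spec_numbers_in_pi pi numbers (numbers_in_pi pi numbers)

-- ===== LEMMAS AND PROOFS =====

-- the candidate values A's inner loop feeds into dp[i], one per end index j
def pvCandA (p : List Char) (S : PySem.Set String) (dp : List (Option Int)) (i : Nat) (js : List Nat) : List Int :=
  js.filterMap (fun j =>
    if PySem.Set.contains S (String.ofList ((p.drop i).take (j + 1 - i))) = true then
      (dp.getD (j + 1) none).map (· + 1)
    else none)

lemma foldl_ominStep_some (l : List Int) (a : Int) :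
    l.foldl pvOminStep (some a) = some (l.foldl min a) := by
  induction l generalizing a with
  | nil => rfl
  | cons x l ih => simp [List.foldl_cons, pvOminStep, ih]

lemma foldl_ominStep_none (l : List Int) :
    l.foldl pvOminStep none = l.min? := by
  cases l with
  | nil => rfl
  | cons a l => simp [List.foldl_cons, pvOminStep, foldl_ominStep_some, List.min?]

lemma min?_congr_mem (l1 l2 : List Int) (h : ∀ x, x ∈ l1 ↔ x ∈ l2) :
    l1.min? = l2.min? := by
  cases h1 : l1.min? with
  | none =>
    have e1 : l1 = [] := List.min?_eq_none_iff.mp h1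
    have e2 : l2 = [] := by
      rw [List.eq_nil_iff_forall_not_mem]
      intro x hx
      have := (h x).mpr hx
      simp [e1] at this
    simp [e2]
  | some a =>
    obtain ⟨ha, hle⟩ := List.min?_eq_some_iff.mp h1
    symm
    rw [List.min?_eq_some_iff]
    exact ⟨(h a).mp ha, fun b hb => hle b ((h b).mpr hb)⟩

lemma getD_set_ne (l : List (Option Int)) (i k : Nat) (h : i ≠ k) (a : Option Int) :
    (l.set i a).getD k none = l.getD k none := by
  simp [List.getD_eq_getElem?_getD, List.getElem?_set_ne h]

lemma getD_set_self (l : List (Option Int)) (i : Nat) (h : i < l.length) (a : Option Int) :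
    (l.set i a).getD i none = a := by
  simp [List.getD_eq_getElem?_getD, h]

-- A's inner loop over j writes only index i: it equals one `set` of the folded min of pvCandA.
lemma innerA_eq (p : List Char) (S : PySem.Set String) (i : Nat) :
    ∀ (js : List Nat) (dp : List (Option Int)), i < dp.length → (∀ j ∈ js, i ≤ j) →
      js.foldl (fun dp j =>
        if PySem.Set.contains S (String.ofList ((p.drop i).take (j + 1 - i))) = true then
          match dp.getD (j + 1) none with
          | none => dp
          | some v => dp.set i (pvOminStep (dp.getD i none) (v + 1))
        else dp) dp
      = dp.set i ((pvCandA p S dp i js).foldl pvOminStep (dp.getD i none)) := by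
  intro js
  induction js with
  | nil =>
    intro dp hi _
    simp [pvCandA, List.getD_eq_getElem?_getD, List.getElem?_eq_getElem hi,
      List.set_getElem_self]
  | cons j js ih =>
    intro dp hi hj
    have hij : i ≤ j := hj j List.mem_cons_self
    have hjs : ∀ j' ∈ js, i ≤ j' := fun j' hj' => hj j' (List.mem_cons_of_mem _ hj')
    simp only [List.foldl_cons]
    by_cases hc : PySem.Set.contains S (String.ofList ((p.drop i).take (j + 1 - i))) = true
    · cases hv : dp.getD (j + 1) none with
      | none =>
        have hstep : (if PySem.Set.contains S (String.ofList ((p.drop i).take (j + 1 - i))) = true then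
            match (none : Option Int) with
            | none => dp
            | some v => dp.set i (pvOminStep (dp.getD i none) (v + 1))
          else dp) = dp := by rw [if_pos hc]
        rw [hstep, ih dp hi hjs]
        have hcc : pvCandA p S dp i (j :: js) = pvCandA p S dp i js := by
          simp only [pvCandA, List.filterMap_cons]
          rw [if_pos hc, hv]
          rfl
        rw [hcc]
      | some v =>
        have hstep : (if PySem.Set.contains S (String.ofList ((p.drop i).take (j + 1 - i))) = true then
            match some v with
            | none => dp
            | some v => dp.set i (pvOminStep (dp.getD i none) (v + 1))
          else dp) = dp.set i (pvOminStep (dp.getD i none) (v + 1)) := by rw [if_pos hc]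
        rw [hstep]
        set dp' := dp.set i (pvOminStep (dp.getD i none) (v + 1)) with hdp'
        have hlen' : i < dp'.length := by simp [hdp', hi]
        rw [ih dp' hlen' hjs]
        have hcand : pvCandA p S dp' i js = pvCandA p S dp i js := by
          unfold pvCandA
          apply List.filterMap_congr
          intro j' hj'
          have hne : i ≠ j' + 1 := by have := hjs j' hj'; omega
          rw [hdp', getD_set_ne dp i (j' + 1) hne _]
        have hget : dp'.getD i none = pvOminStep (dp.getD i none) (v + 1) :=
          getD_set_self dp i hi _
        have hcc : pvCandA p S dp i (j :: js) = (v + 1) :: pvCandA p S dp i js := by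
          simp only [pvCandA, List.filterMap_cons]
          rw [if_pos hc, hv]
          rfl
        rw [hcand, hget, hdp', List.set_set, hcc, List.foldl_cons]
    · have hstep : (if PySem.Set.contains S (String.ofList ((p.drop i).take (j + 1 - i))) = true then
          match dp.getD (j + 1) none with
          | none => dp
          | some v => dp.set i (pvOminStep (dp.getD i none) (v + 1))
        else dp) = dp := by rw [if_neg hc]
      rw [hstep, ih dp hi hjs]
      have hcc : pvCandA p S dp i (j :: js) = pvCandA p S dp i js := by
        simp only [pvCandA, List.filterMap_cons]
        rw [if_neg hc]
      rw [hcc]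

-- The two candidate lists have the same members (when dp[i] is still unset).
lemma cand_mem_iff (p : List Char) (numbers : List String) (dp : List (Option Int)) (i : Nat)
    (hlen : dp.length = p.length + 1) (hi : i < p.length) (hnone : dp.getD i none = none) :
    ∀ x, x ∈ pvCandA p (PySem.Set.ofList numbers) dp i (List.range' i (p.length - i)) ↔
          x ∈ pvCands (PySem.Set.ofList numbers) p dp i := by
  intro x
  constructor
  · intro hx
    unfold pvCandA at hx
    rw [List.mem_filterMap] at hx
    obtain ⟨j, hjmem, hfj⟩ := hx
    rw [List.mem_range'_1] at hjmem
    obtain ⟨hij, hjn⟩ := hjmem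
    have hjlt : j < p.length := by omega
    by_cases hc : PySem.Set.contains (PySem.Set.ofList numbers)
        (String.ofList ((p.drop i).take (j + 1 - i))) = true
    · rw [if_pos hc] at hfj
      cases hv : dp.getD (j + 1) none with
      | none => rw [hv] at hfj; exact absurd hfj (by simp)
      | some v =>
        rw [hv, Option.map_some] at hfj
        set w := String.ofList ((p.drop i).take (j + 1 - i)) with hw
        have hwl : w.toList = (p.drop i).take (j + 1 - i) := by
          rw [hw, String.toList_ofList]
        have hlent : ((p.drop i).take (j + 1 - i)).length = j + 1 - i := by
          simp [List.length_take, List.length_drop]; omega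
        have hmemw : w ∈ PySem.Set.ofList numbers := by
          rw [← PySem.Set.contains_iff]; exact hc
        unfold pvCands
        rw [List.mem_filterMap]
        refine ⟨w, hmemw, ?_⟩
        have hsw : pvStartswithAt p w.toList i = true := by
          unfold pvStartswithAt
          rw [hwl, hlent]
          exact beq_self_eq_true _
        rw [if_pos hsw]
        have hiw : i + w.toList.length = j + 1 := by rw [hwl, hlent]; omega
        rw [hiw, hv]
        exact hfj
    · rw [if_neg hc] at hfj
      exact absurd hfj (by simp)
  · intro hx
    unfold pvCands at hx
    rw [List.mem_filterMap] at hx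
    obtain ⟨w, hwmem, hfw⟩ := hx
    by_cases hsw : pvStartswithAt p w.toList i = true
    · rw [if_pos hsw] at hfw
      have hswl : (p.drop i).take w.toList.length = w.toList := by
        unfold pvStartswithAt at hsw
        exact beq_iff_eq.mp hsw
      cases hv : dp.getD (i + w.toList.length) none with
      | none => rw [hv] at hfw; exact absurd hfw (by simp)
      | some v =>
        rw [hv] at hfw
        have hfw' : some (v + 1) = some x := hfw
        have hwpos : 0 < w.toList.length := by
          by_contra h0
          have hz : w.toList.length = 0 := by omega
          rw [hz, Nat.add_zero, hnone] at hv
          exact absurd hv (by simp)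
        have hinb : i + w.toList.length ≤ p.length := by
          by_contra hgt
          rw [List.getD_eq_default dp none (by omega : dp.length ≤ i + w.toList.length)] at hv
          exact absurd hv (by simp)
        unfold pvCandA
        rw [List.mem_filterMap]
        refine ⟨i + w.toList.length - 1, ?_, ?_⟩
        · rw [List.mem_range'_1]; omega
        · have hj1 : i + w.toList.length - 1 + 1 = i + w.toList.length := by omega
          have hj1i : i + w.toList.length - 1 + 1 - i = w.toList.length := by omega
          have hc : PySem.Set.contains (PySem.Set.ofList numbers)
              (String.ofList ((p.drop i).take (i + w.toList.length - 1 + 1 - i))) = true := by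
            rw [hj1i, hswl, String.ofList_toList, PySem.Set.contains_iff]
            exact hwmem
          rw [if_pos hc, hj1, hv, Option.map_some]
          exact hfw'
    · rw [if_neg hsw] at hfw
      exact absurd hfw (by simp)

-- Outer loops agree step by step (dp cells below k are still unset).
lemma outer_eq (p : List Char) (numbers : List String) :
    ∀ (k : Nat) (dp : List (Option Int)), k ≤ p.length → dp.length = p.length + 1 →
      (∀ m, m < k → dp.getD m none = none) →
      (List.range k).reverse.foldl (fun dp i =>
        (List.range' i (p.length - i)).foldl (fun dp j =>
          if PySem.Set.contains (PySem.Set.ofList numbers)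
              (String.ofList ((p.drop i).take (j + 1 - i))) = true then
            match dp.getD (j + 1) none with
            | none => dp
            | some v => dp.set i (pvOminStep (dp.getD i none) (v + 1))
          else dp) dp) dp
      = (List.range k).reverse.foldl (fun dp i =>
          dp.set i (pvCands (PySem.Set.ofList numbers) p dp i).min?) dp := by
  intro k
  induction k with
  | zero => intro dp _ _ _; simp
  | succ k ih =>
    intro dp hk hlen hunset
    have hrev : (List.range (k + 1)).reverse = k :: (List.range k).reverse := by
      simp [List.range_succ]
    rw [hrev]
    simp only [List.foldl_cons]
    have hik : k < dp.length := by omega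
    have hkn : k < p.length := by omega
    rw [innerA_eq p (PySem.Set.ofList numbers) k (List.range' k (p.length - k)) dp hik
      (fun j hj => (List.mem_range'_1.mp hj).1)]
    rw [hunset k (by omega)]
    rw [foldl_ominStep_none]
    rw [min?_congr_mem _ _ (cand_mem_iff p numbers dp k hlen hkn (hunset k (by omega)))]
    exact ih (dp.set k (pvCands (PySem.Set.ofList numbers) p dp k).min?)
      (by omega) (by simp [hlen])
      (fun m hm => by rw [getD_set_ne dp k m (by omega) _]; exact hunset m (by omega))

lemma dp0_unset (n m : Nat) (hm : m < n) :
    ((List.replicate (n + 1) (none : Option Int)).set n (some 0)).getD m none = none := by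
  rw [getD_set_ne _ n m (by omega) _]
  have hlt : m < n + 1 := by omega
  simp [List.getD_eq_getElem?_getD, hlt]

-- ===== VERDICT (by name: the statement is the Claim_ definition above) =====
theorem numbers_in_pi_spec : Claim_equal_numbers_in_pi := by
  intro pi numbers _ hpre
  unfold Spec_numbers_in_pi
  simp only [numbers_in_pi, numbers_in_pi_alt]
  by_cases hp : pi.toList = []
  · have hpi : pi = "" := by
      have := congrArg String.ofList hp
      rwa [String.ofList_toList] at this
    have hnum : numbers ≠ [] := fun h => hpre ⟨hpi, h⟩
    simp [hp, hnum]
  · rw [if_neg hp]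
    have hlen0 : ((List.replicate (pi.toList.length + 1) (none : Option Int)).set
        pi.toList.length (some 0)).length = pi.toList.length + 1 := by simp
    rw [outer_eq pi.toList numbers pi.toList.length
      ((List.replicate (pi.toList.length + 1) (none : Option Int)).set pi.toList.length (some 0))
      (le_refl _) hlen0 (fun m hm => dp0_unset pi.toList.length m hm)]
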